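-- pv_equiv track=rewrite | github.com/johan456789/md5-cracker | app.py | str_generator
-- ===== SOURCE A (Python) =====
-- import string
--
-- SIZE_OF_ALPHABET = len(string.ascii_letters)
--
-- def str2nums(s):
--     nums = []
--     for c in s:
--         if c.islower():  # 0-25 is a-z
--             nums.append(ord(c) - ord('a'))
--         else:  # 26-51 is A-Z
--             nums.append(ord(c) + 26 - ord('A'))
--     return nums
--
-- def nums2str(nums):
--     str_builder = []
--     for n in nums:
--         if n < 26:  # 0-25 is a-z
--             str_builder.append(chr(n + ord('a')))
--         else:  # 26-51 is A-Z
--             str_builder.append(chr(n - 26 + ord('A')))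
--     return ''.join(str_builder)
--
-- def str_generator(start_s, end_s):
--     # assuming start_s < end_s and are valid strings
--     start_nums, end_nums = str2nums(start_s), str2nums(end_s)
--     nums = start_nums
--     while nums <= end_nums:
--         yield nums2str(nums)
--
--         # increment by 1
--         i = len(nums) - 1
--         while i >= 0:
--             nums[i] = nums[i] + 1
--             if nums[i] < SIZE_OF_ALPHABET:
--                 break
--             nums[i] = 0
--             i -= 1
--         if i < 0:
--             return
-- ===== SOURCE B (Python) =====
-- def str2nums(s):
--     nums = []
--     for c in s:
--         if c.islower():  # 0-25 is a-z
--             nums.append(ord(c) - ord('a'))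
--         else:  # 26-51 is A-Z
--             nums.append(ord(c) + 26 - ord('A'))
--     return nums
--
-- def nums2str(nums):
--     str_builder = []
--     for n in nums:
--         if n < 26:  # 0-25 is a-z
--             str_builder.append(chr(n + ord('a')))
--         else:  # 26-51 is A-Z
--             str_builder.append(chr(n - 26 + ord('A')))
--     return ''.join(str_builder)
--
-- def str_generator(start_s, end_s):
--     # position kept as a single base-52 counter n instead of a mutable digit list
--     L = len(start_s)
--     end_nums = str2nums(end_s)
--     n = 0
--     for d in str2nums(start_s):
--         n = n * 52 + d
--     limit = 52 ** L
--     while n < limit: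
--         # decode n into exactly L base-52 digits
--         q = n
--         digits = []
--         for _ in range(L):
--             q, r = divmod(q, 52)
--             digits.append(r)
--         digits.reverse()
--         if digits > end_nums:
--             break
--         yield nums2str(digits)
--         n += 1
-- ===== Notes on version B (the rewrite author's own statement) =====
-- stated objective: alternative
-- what changed: A walks a mutable digit list with a manual right-to-left carry loop and a list-lexicographic guard; B keeps the position as a single base-52 integer counter, incrementing it with n += 1 and decoding it into exactly L digits via divmod each step, stopping at n >= 52**L or when the decoded digits exceed end_nums.
-- outside the precondition, e.g. on str_generator('!', 'c'): A returns ['[', '\\', ']', '^', '_', '`', 'a', 'b', 'c'], B returns []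
import Mathlib
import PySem

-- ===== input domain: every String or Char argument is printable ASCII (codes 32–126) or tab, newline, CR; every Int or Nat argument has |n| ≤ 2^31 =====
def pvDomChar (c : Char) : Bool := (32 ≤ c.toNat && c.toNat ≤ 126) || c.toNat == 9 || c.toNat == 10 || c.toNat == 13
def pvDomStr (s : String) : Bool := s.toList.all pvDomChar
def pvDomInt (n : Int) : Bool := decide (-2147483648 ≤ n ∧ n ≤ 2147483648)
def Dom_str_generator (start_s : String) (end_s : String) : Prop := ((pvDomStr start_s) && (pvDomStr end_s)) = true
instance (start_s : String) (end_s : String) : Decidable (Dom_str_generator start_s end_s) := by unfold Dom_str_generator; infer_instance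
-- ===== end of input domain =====

-- B replaces A's mutable digit list and manual right-to-left carry loop by a single
-- base-52 integer counter that is incremented and decoded each step (objective: alternative).

-- Shared helpers: both Pythons contain identical copies of str2nums / nums2str, and both
-- compare int lists with Python's lexicographic `<=`; ported once and used by both ports.

-- c.islower(); exact on the ASCII domain the theorems are about
def pvIsLower (c : Char) : Bool := 97 ≤ c.toNat && c.toNat ≤ 122

-- one digit of str2nums: ord(c)-ord('a') if c.islower() else ord(c)+26-ord('A')
def pvDigit (c : Char) : Int :=
  if pvIsLower c then (c.toNat : Int) - 97 else (c.toNat : Int) + 26 - 65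

def str2numsP (cs : List Char) : List Int := cs.map pvDigit

-- chr(n+ord('a')) / chr(n-26+ord('A')); exact for the digit range 0..51 these ports reach
def pvNum2Char (n : Int) : Char :=
  if n < 26 then Char.ofNat (n + 97).toNat else Char.ofNat (n - 26 + 65).toNat

def nums2strP (ns : List Int) : String := String.ofList (ns.map pvNum2Char)

-- Python list comparison `xs <= ys` on int lists
def lexLe : List Int → List Int → Bool
  | [], _ => true
  | _ :: _, [] => false
  | a :: as, b :: bs => if a < b then true else if b < a then false else lexLe as bs

-- ===== PORT A =====
-- the inner `while i >= 0` carry loop, scanning the digit list right-to-left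
-- (acts on the REVERSED digit list); none = the `i < 0: return` overflow case
def incRev : List Int → Option (List Int)
  | [] => none
  | d :: ds => if d + 1 < 52 then some ((d + 1) :: ds) else (incRev ds).map (fun r => 0 :: r)

-- the outer `while nums <= end_nums` loop; fuel bounds the iteration count
def loopA : Nat → List Int → List Int → List String
  | 0, _, _ => []
  | f + 1, nums, en =>
    if lexLe nums en then
      nums2strP nums ::
        (match incRev nums.reverse with
          | none => []
          | some r => loopA f r.reverse en)
    else []

def str_generator (start_s : String) (end_s : String) : List String :=
  loopA (52 ^ start_s.toList.length + 1) (str2numsP start_s.toList) (str2numsP end_s.toList)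

-- ===== PORT B =====
-- the `for _ in range(L): q, r = divmod(q, 52); digits.append(r)` decode loop
def decodeGo : Nat → Int → List Int → List Int
  | 0, _, acc => acc
  | k + 1, q, acc => decodeGo k (PySem.Int.floordiv q 52) (acc ++ [PySem.Int.mod q 52])

def decodeB (L : Nat) (n : Int) : List Int := (decodeGo L n []).reverse

-- the `while n < limit` counter loop; `if digits > end_nums: break` = continue when lexLe
def loopB : Nat → Int → Int → Nat → List Int → List String
  | 0, _, _, _, _ => []
  | f + 1, n, limit, L, en =>
    if n < limit then
      let ds := decodeB L n
      if lexLe ds en then nums2strP ds :: loopB f (n + 1) limit L en else []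
    else []

def str_generator_alt (start_s : String) (end_s : String) : List String :=
  let L := start_s.toList.length
  let en := str2numsP end_s.toList
  let n := (str2numsP start_s.toList).foldl (fun a d => a * 52 + d) 0
  loopB (52 ^ L + 1) n (52 ^ L) L en

-- ===== PRECONDITION & SPEC =====
-- Pre_ requires every char of start_s to have a str2nums digit inside the alphabet 0..51
-- (lower-case letters, or codes 39-90, which include A-Z and digits); A's own comment assumes
-- "valid strings", and on other characters A's digit list leaves 0..51 and its carry
-- arithmetic yields an accidental sequence (e.g. '[' , '\\', …) no base-52 counter reproduces.
def Pre_str_generator (start_s : String) (end_s : String) : Prop :=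
  start_s.toList.all (fun c => (97 ≤ c.toNat && c.toNat ≤ 122) || (39 ≤ c.toNat && c.toNat ≤ 90)) = true
instance (start_s : String) (end_s : String) : Decidable (Pre_str_generator start_s end_s) := by
  unfold Pre_str_generator; infer_instance

def pvWitness_str_generator : String × String := ("y", "B")

def Spec_str_generator (start_s : String) (end_s : String) (out : List String) : Prop := out = str_generator_alt start_s end_s
instance (start_s : String) (end_s : String) (out : List String) : Decidable (Spec_str_generator start_s end_s out) := by unfold Spec_str_generator; infer_instance

-- ===== CLAIM (what is proved, stated in full; the proofs are below) =====
def Claim_equal_str_generator : Prop := ∀ (start_s : String) (end_s : String), Dom_str_generator start_s end_s → Pre_str_generator start_s end_s → Spec_str_generator start_s end_s (str_generator start_s end_s)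

-- ===== LEMMAS AND PROOFS =====

-- digits in range 0..51
def Canon (ds : List Int) : Prop := ∀ d ∈ ds, 0 ≤ d ∧ d < 52

-- value of a digit list, most significant first (B's fold)
def valD (ds : List Int) : Int := ds.foldl (fun a d => a * 52 + d) 0

-- value of a REVERSED digit list, least significant first
def valR : List Int → Int
  | [] => 0
  | d :: ds => d + 52 * valR ds

theorem valD_append (ds : List Int) (d : Int) : valD (ds ++ [d]) = valD ds * 52 + d := by
  simp [valD]

theorem valD_eq_valR (ds : List Int) : valD ds = valR ds.reverse := by
  induction ds using List.reverseRecOn with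
  | nil => simp [valD, valR]
  | append_singleton ds d ih =>
      rw [valD_append, ih]
      simp [valR, mul_comm]
      ring

theorem valR_bounds (rs : List Int) (h : Canon rs) :
    0 ≤ valR rs ∧ valR rs < 52 ^ rs.length := by
  induction rs with
  | nil => simp [valR]
  | cons d ds ih =>
      have hd := h d (by simp)
      have hds : Canon ds := fun x hx => h x (by simp [hx])
      have ⟨h1, h2⟩ := ih hds
      constructor
      · simp only [valR]; nlinarith
      · simp only [valR, List.length_cons, pow_succ]
        nlinarith

theorem incRev_none (rs : List Int) (h : Canon rs) (hn : incRev rs = none) :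
    valR rs = 52 ^ rs.length - 1 := by
  induction rs with
  | nil => simp [valR]
  | cons d ds ih =>
      have hd := h d (by simp)
      have hds : Canon ds := fun x hx => h x (by simp [hx])
      simp only [incRev] at hn
      split_ifs at hn with h1
      · cases hcase : incRev ds with
        | none =>
            have hv := ih hds hcase
            have hd51 : d = 51 := by omega
            simp only [valR, List.length_cons, pow_succ, hd51, hv]
            ring
        | some r => rw [hcase] at hn; simp at hn

theorem incRev_some (rs r : List Int) (h : Canon rs) (hs : incRev rs = some r) :
    Canon r ∧ r.length = rs.length ∧ valR r = valR rs + 1 := by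
  induction rs generalizing r with
  | nil => simp [incRev] at hs
  | cons d ds ih =>
      have hd := h d (by simp)
      have hds : Canon ds := fun x hx => h x (by simp [hx])
      simp only [incRev] at hs
      split_ifs at hs with h1
      · have hr : r = (d + 1) :: ds := (Option.some.inj hs).symm
        subst hr
        refine ⟨?_, by simp, by simp [valR]; ring⟩
        intro x hx
        rcases List.mem_cons.mp hx with h' | h'
        · omega
        · exact hds x h'
      · have hd51 : d = 51 := by omega
        cases hcase : incRev ds with
        | none => rw [hcase] at hs; simp at hs
        | some r' =>
            rw [hcase] at hs
            simp only [Option.map_some] at hs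
            have hr : r = 0 :: r' := (Option.some.inj hs).symm
            subst hr
            obtain ⟨hc', hl', hv'⟩ := ih r' hds hcase
            refine ⟨?_, by simp [hl'], ?_⟩
            · intro x hx
              rcases List.mem_cons.mp hx with h' | h'
              · omega
              · exact hc' x h'
            · simp only [valR, hv', hd51]; ring

theorem decodeGo_acc (k : Nat) (q : Int) (acc : List Int) :
    decodeGo k q acc = acc ++ decodeGo k q [] := by
  induction k generalizing q acc with
  | zero => simp [decodeGo]
  | succ k ih =>
      simp only [decodeGo]
      rw [ih _ (acc ++ _), ih _ ([] ++ _)]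
      simp

theorem decode_valR (rs : List Int) (h : Canon rs) :
    decodeGo rs.length (valR rs) [] = rs := by
  induction rs with
  | nil => simp [decodeGo]
  | cons d ds ih =>
      have hd := h d (by simp)
      have hds : Canon ds := fun x hx => h x (by simp [hx])
      simp only [List.length_cons, decodeGo, valR]
      have hfd : PySem.Int.floordiv (d + 52 * valR ds) 52 = valR ds := by
        rw [PySem.Int.floordiv_eq_ediv_of_pos (by norm_num)]
        omega
      have hmd : PySem.Int.mod (d + 52 * valR ds) 52 = d := by
        rw [PySem.Int.mod_eq_emod_of_pos (by norm_num)]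
        omega
      rw [hfd, hmd, decodeGo_acc, ih hds]
      simp

theorem decodeB_valD (ds : List Int) (h : Canon ds) :
    decodeB ds.length (valD ds) = ds := by
  have hr : Canon ds.reverse := fun x hx => h x (List.mem_reverse.mp hx)
  have := decode_valR ds.reverse hr
  simp only [List.length_reverse] at this
  rw [decodeB, valD_eq_valR, this, List.reverse_reverse]

-- main loop correspondence: A's digit-list loop equals B's counter loop
theorem loop_eq (f : Nat) (ds en : List Int) (L : Nat) (h : Canon ds) (hL : ds.length = L) :
    loopA f ds en = loopB f (valD ds) (52 ^ L) L en := by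
  induction f generalizing ds with
  | zero => simp [loopA, loopB]
  | succ f ih =>
      have hb := valR_bounds ds.reverse (fun x hx => h x (List.mem_reverse.mp hx))
      rw [List.length_reverse, hL] at hb
      have hv : valD ds < 52 ^ L := by rw [valD_eq_valR]; exact hb.2
      simp only [loopA, loopB, if_pos hv]
      have hdec : decodeB L (valD ds) = ds := by rw [← hL]; exact decodeB_valD ds h
      rw [hdec]
      by_cases hle : lexLe ds en = true
      · simp only [hle, if_true]
        cases hinc : incRev ds.reverse with
        | none =>
            have := incRev_none ds.reverse (fun x hx => h x (List.mem_reverse.mp hx)) hinc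
            rw [List.length_reverse, hL] at this
            have hv1 : valD ds + 1 = 52 ^ L := by rw [valD_eq_valR, this]; ring
            cases f with
            | zero => simp [loopB]
            | succ f' => simp [loopB, hv1]
        | some r =>
            obtain ⟨hc, hlen, hval⟩ :=
              incRev_some ds.reverse r (fun x hx => h x (List.mem_reverse.mp hx)) hinc
            have hc' : Canon r.reverse := fun x hx => hc x (List.mem_reverse.mp hx)
            have hlen' : r.reverse.length = L := by
              simp [hlen, hL]
            have hval' : valD r.reverse = valD ds + 1 := by
              rw [valD_eq_valR, List.reverse_reverse, hval, valD_eq_valR]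
            have hred : (match some r with
                | none => ([] : List String)
                | some r => loopA f r.reverse en) = loopA f r.reverse en := rfl
            rw [hred, ih r.reverse hc' hlen', hval']
      · simp [hle]

theorem canon_str2nums (cs : List Char)
    (h : cs.all (fun c => (97 ≤ c.toNat && c.toNat ≤ 122) || (39 ≤ c.toNat && c.toNat ≤ 90)) = true) :
    Canon (str2numsP cs) := by
  intro d hd
  simp only [str2numsP, List.mem_map] at hd
  obtain ⟨c, hc, rfl⟩ := hd
  have := List.all_eq_true.mp h c hc
  simp only [Bool.or_eq_true, Bool.and_eq_true, decide_eq_true_eq] at this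
  simp only [pvDigit, pvIsLower]
  rcases this with ⟨h1, h2⟩ | ⟨h1, h2⟩
  · rw [if_pos (by simp [h1, h2])]; omega
  · rw [if_neg (by simp; omega)]; omega

-- ===== VERDICT (by name: the statement is the Claim_ definition above) =====
theorem str_generator_spec : Claim_equal_str_generator := by
  intro start_s end_s _hdom hpre
  unfold Spec_str_generator str_generator str_generator_alt
  have hcanon : Canon (str2numsP start_s.toList) := canon_str2nums _ hpre
  have hlen : (str2numsP start_s.toList).length = start_s.toList.length := by
    simp [str2numsP]
  rw [loop_eq _ _ _ _ hcanon hlen]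
  rfl
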